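-- pv_equiv track=rewrite | github.com/MrBrantCode/unitest_baseline | mut_generate/mist_train_cf/cf_59721/solution.py | findRanksAndPerformance
-- ===== SOURCE A (Python) =====
-- def findRanksAndPerformance(score, performance):
--     athletes = sorted([(s, idx) for idx, s in enumerate(score)], reverse=True)
--     ranks = [0] * len(score)
--     finalScore = [0] * len(score)
--     prev_score, rank = athletes[0][0], 1
--     rank_start = 0
--
--     for idx, (s, orig_idx) in enumerate(athletes):
--         if s != prev_score:
--             rank = idx + 1
--             rank_start = idx
--         ranks[orig_idx] = rank
--         finalScore[orig_idx] = rank * performance[orig_idx]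
--         prev_score = s
--
--     return finalScore
-- ===== SOURCE B (Python) =====
-- def findRanksAndPerformance(score, performance):
--     # competition rank of a score = 1 + number of strictly greater scores,
--     # i.e. 1 + index of its first occurrence in the descending order
--     rank_of = {}
--     for r, s in enumerate(sorted(score, reverse=True), 1):
--         rank_of.setdefault(s, r)
--     return [rank_of[s] * performance[i] for i, s in enumerate(score)]
-- ===== Notes on version B (the rewrite author's own statement) =====
-- stated objective: simpler
-- what changed: B sorts the scores once, builds a dict mapping each distinct score to the rank of its first occurrence in the descending order (setdefault), and maps the original list through it; A instead sorts (score,index) pairs and scatters ranks back through the stored indices with run-tracking loop state over two preallocated arrays.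
import Mathlib
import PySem

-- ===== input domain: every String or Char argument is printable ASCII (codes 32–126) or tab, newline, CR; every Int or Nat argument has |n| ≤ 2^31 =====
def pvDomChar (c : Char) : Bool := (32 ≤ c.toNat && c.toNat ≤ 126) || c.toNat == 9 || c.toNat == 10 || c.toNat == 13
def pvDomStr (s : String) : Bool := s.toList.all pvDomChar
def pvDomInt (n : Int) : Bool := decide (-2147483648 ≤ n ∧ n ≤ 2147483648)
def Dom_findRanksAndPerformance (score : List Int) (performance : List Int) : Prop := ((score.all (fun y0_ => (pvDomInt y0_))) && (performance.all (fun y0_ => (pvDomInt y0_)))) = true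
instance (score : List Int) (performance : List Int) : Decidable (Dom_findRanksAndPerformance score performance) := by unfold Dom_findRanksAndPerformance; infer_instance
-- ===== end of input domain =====

-- B sorts the scores once, builds a table mapping each distinct score to the rank of
-- its first occurrence in the descending order, then maps the original list through it;
-- A instead sorts (score, index) pairs and scatters ranks back through the stored
-- indices with run-tracking loop state. Objective: simpler. Same exact values on all
-- inputs admitted by Pre_.

-- ===== PORT A =====
-- loop body of A's 'for idx, (s, orig_idx) in enumerate(athletes)': state is
-- (ranks, finalScore, prev_score, rank, rank_start)
def stepA (performance : List Int)
    (st : List Int × List Int × Int × Int × Int) (q : Int × (Int × Int)) :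
    List Int × List Int × Int × Int × Int :=
  let idx := q.1
  let s := q.2.1
  let orig_idx := q.2.2
  let rank := if s ≠ st.2.2.1 then idx + 1 else st.2.2.2.1
  let rank_start := if s ≠ st.2.2.1 then idx else st.2.2.2.2
  (PySem.List.pySetD st.1 orig_idx rank,
   PySem.List.pySetD st.2.1 orig_idx (rank * PySem.List.pyGetD performance orig_idx 0),
   s, rank, rank_start)

def findRanksAndPerformance (score : List Int) (performance : List Int) : List Int :=
  let athletes := PySem.List.sorted2
    ((PySem.List.enumerate score).map (fun p => (p.2, p.1))) (fun x => x.1) (fun x => x.2) true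
  let ranks : List Int := List.replicate score.length 0
  let finalScore : List Int := List.replicate score.length 0
  match athletes with
  | [] => []  -- Python raises IndexError on 'athletes[0][0]' here; excluded by Pre_
  | a0 :: _ =>
    ((PySem.List.enumerate athletes).foldl (stepA performance)
      (ranks, finalScore, a0.1, 1, 0)).2.1

-- ===== PORT B =====
-- 'rank_of[s]' in B never raises: every s of score occurs in the sorted list, so s is
-- always a key; 'Dict.getD … 0' is exact there.
def findRanksAndPerformance_alt (score : List Int) (performance : List Int) : List Int :=
  let rank_of := (PySem.List.enumerate (PySem.List.sorted score (fun y => y) true) 1).foldl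
    (fun d p => PySem.Dict.setdefault d p.2 p.1) PySem.Dict.empty
  (PySem.List.enumerate score).map (fun p =>
    rank_of.getD p.2 0 * PySem.List.pyGetD performance p.1 0)

-- ===== PRECONDITION & SPEC =====
-- Pre_ excludes exactly the inputs on which Python A raises: empty score
-- (athletes[0] → IndexError) and performance shorter than score
-- (performance[orig_idx] → IndexError).
def Pre_findRanksAndPerformance (score : List Int) (performance : List Int) : Prop :=
  score ≠ [] ∧ score.length ≤ performance.length
instance (score : List Int) (performance : List Int) : Decidable (Pre_findRanksAndPerformance score performance) := by unfold Pre_findRanksAndPerformance; infer_instance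

def pvWitness_findRanksAndPerformance : List Int × List Int := ([3, 1, 3, 2], [2, 5, 7, 1])

def Spec_findRanksAndPerformance (score : List Int) (performance : List Int) (out : List Int) : Prop := out = findRanksAndPerformance_alt score performance
instance (score : List Int) (performance : List Int) (out : List Int) : Decidable (Spec_findRanksAndPerformance score performance out) := by unfold Spec_findRanksAndPerformance; infer_instance

-- ===== CLAIM (what is proved, stated in full; the proofs are below) =====
def Claim_equal_findRanksAndPerformance : Prop := ∀ (score : List Int) (performance : List Int), Dom_findRanksAndPerformance score performance → Pre_findRanksAndPerformance score performance → Spec_findRanksAndPerformance score performance (findRanksAndPerformance score performance)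

-- ===== LEMMAS AND PROOFS =====

-- generic: foldl-insertBy with an asymmetric, co-transitive 'before' yields a list
-- pairwise ordered by 'later is not before earlier'
theorem insertBy_pairwise {α : Type} (before : α → α → Bool)
    (hasym : ∀ a b, before a b = true → before b a = false)
    (htrans : ∀ a b c, before b a = false → before c b = false → before c a = false)
    (x : α) (l : List α) (hl : l.Pairwise (fun a b => before b a = false)) :
    (PySem.List.insertBy before x l).Pairwise (fun a b => before b a = false) := by
  induction l with
  | nil => simp [PySem.List.insertBy]
  | cons y ys ih =>
    rw [List.pairwise_cons] at hl
    obtain ⟨hy, hys⟩ := hl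
    by_cases hb : before x y = true
    · simp only [PySem.List.insertBy, hb, if_true]
      refine List.Pairwise.cons ?_ (List.Pairwise.cons hy hys)
      intro z hz
      rcases List.mem_cons.mp hz with rfl | hz
      · exact hasym _ _ hb
      · exact htrans _ _ _ (hasym _ _ hb) (hy z hz)
    · simp only [PySem.List.insertBy, hb]
      refine List.Pairwise.cons ?_ (ih hys)
      intro z hz
      rw [PySem.List.mem_insertBy] at hz
      rcases hz with rfl | hz
      · exact Bool.eq_false_iff.mpr hb
      · exact hy z hz

theorem foldl_insertBy_pairwise {α : Type} (before : α → α → Bool)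
    (hasym : ∀ a b, before a b = true → before b a = false)
    (htrans : ∀ a b c, before b a = false → before c b = false → before c a = false)
    (xs : List α) :
    ∀ (acc : List α), acc.Pairwise (fun a b => before b a = false) →
      (xs.foldl (fun acc x => PySem.List.insertBy before x acc) acc).Pairwise
        (fun a b => before b a = false) := by
  induction xs with
  | nil => intro acc h; simpa using h
  | cons x xs ih =>
    intro acc h
    exact ih _ (insertBy_pairwise before hasym htrans x acc h)

-- athletes (= sorted(pairs, reverse=True)) is weakly decreasing in its first component
theorem sorted2_rev_pairwise_fst (xs : List (Int × Int)) :
    (PySem.List.sorted2 xs (fun x => x.1) (fun x => x.2) true).Pairwise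
      (fun a b => b.1 ≤ a.1) := by
  have h := foldl_insertBy_pairwise
      (fun a b : Int × Int => (decide (b.1 < a.1) || (!decide (a.1 < b.1) && decide (b.2 < a.2))))
      (by intro a b hab; simp at hab ⊢; omega)
      (by intro a b c h1 h2; simp at h1 h2 ⊢; omega)
      xs [] (by simp)
  have hdef : PySem.List.sorted2 xs (fun x => x.1) (fun x => x.2) true
      = xs.foldl (fun acc x => PySem.List.insertBy
          (fun a b : Int × Int => (decide (b.1 < a.1) || (!decide (a.1 < b.1) && decide (b.2 < a.2))))
          x acc) [] := rfl
  rw [hdef]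
  refine h.imp ?_
  intro a b hab
  simp at hab
  omega

def rkA (M : List (Int × Int)) (s : Int) : Int :=
  1 + ((M.map (fun p => p.1)).countP (fun t => s < t) : Int)

-- main loop invariant: with the rank accumulator correct for prev, A's stateful fold
-- writes, for each remaining pair (s, oi), exactly (1 + #strictly greater) * perf[oi]
theorem loop_final (perf : List Int) (M : List (Int × Int)) :
    ∀ (rest done : List (Int × Int)) (prev rank rs : Int) (ranks final : List Int),
    M = done ++ rest →
    M.Pairwise (fun a b => b.1 ≤ a.1) →
    (∀ a ∈ done, prev ≤ a.1) →
    (∀ b ∈ rest, b.1 ≤ prev) →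
    rank = rkA M prev →
    ((PySem.List.enumerate rest (done.length : Int)).foldl (stepA perf)
        (ranks, final, prev, rank, rs)).2.1
      = rest.foldl
          (fun f p => PySem.List.pySetD f p.2 (rkA M p.1 * PySem.List.pyGetD perf p.2 0))
          final := by
  intro rest
  induction rest with
  | nil =>
    intro done prev rank rs ranks final _ _ _ _ _
    simp [PySem.List.enumerate_nil]
  | cons p rest ih =>
    intro done prev rank rs ranks final hM hpw hgt hge hrank
    obtain ⟨s, oi⟩ := p
    -- pairwise facts about the split M = done ++ (s,oi) :: rest
    have hpw' := hM ▸ hpw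
    have hrest_pw : ((s, oi) :: rest).Pairwise (fun a b : Int × Int => b.1 ≤ a.1) :=
      (List.pairwise_append.mp hpw').2.1
    have hrest_le : ∀ b ∈ rest, b.1 ≤ s := by
      intro b hb
      exact (List.pairwise_cons.mp hrest_pw).1 b hb
    have hrankeq : (if s ≠ prev then (done.length : Int) + 1 else rank) = rkA M s := by
      by_cases hs : s = prev
      · subst hs; simpa using hrank
      · simp only [ne_eq, hs, not_false_eq_true, if_true]
        have hslt : s < prev := lt_of_le_of_ne (hge (s, oi) (by simp)) hs
        have hdone : (done.map (fun p => p.1)).countP (fun t => decide (s < t)) = done.length := by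
          have h1 : (done.map (fun p => p.1)).countP (fun t => decide (s < t))
              = (done.map (fun p => p.1)).length :=
            List.countP_eq_length.mpr (by
              intro t ht
              obtain ⟨a, ha, rfl⟩ := List.mem_map.mp ht
              exact decide_eq_true (lt_of_lt_of_le hslt (hgt a ha)))
          simpa using h1
        have hrest0 : (((s, oi) :: rest).map (fun p => p.1)).countP (fun t => decide (s < t)) = 0 := by
          rw [List.countP_eq_zero]
          intro t ht
          obtain ⟨a, ha, rfl⟩ := List.mem_map.mp ht
          rcases List.mem_cons.mp ha with rfl | ha
          · simp
          · simpa using not_lt_of_ge (hrest_le a ha)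
        rw [rkA, hM, List.map_append, List.countP_append, hdone, hrest0]
        push_cast
        ring
    have hstep : stepA perf (ranks, final, prev, rank, rs) ((done.length : Int), (s, oi))
        = (PySem.List.pySetD ranks oi (rkA M s),
           PySem.List.pySetD final oi (rkA M s * PySem.List.pyGetD perf oi 0),
           s, rkA M s, if s ≠ prev then (done.length : Int) else rs) := by
      simp only [stepA]
      rw [hrankeq]
    rw [PySem.List.enumerate_cons, List.foldl_cons, List.foldl_cons, hstep]
    have hlen : ((done ++ [(s, oi)]).length : Int) = (done.length : Int) + 1 := by
      simp
    have := ih (done ++ [(s, oi)]) s (rkA M s)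
      (if s ≠ prev then (done.length : Int) else rs)
      (PySem.List.pySetD ranks oi (rkA M s))
      (PySem.List.pySetD final oi (rkA M s * PySem.List.pyGetD perf oi 0))
      (by rw [hM]; simp)
      hpw
      (by
        intro a ha
        rcases List.mem_append.mp ha with ha | ha
        · exact le_trans (hge (s, oi) (by simp)) (hgt a ha)
        · simp at ha; subst ha; exact le_refl _)
      hrest_le
      rfl
    rw [hlen] at this
    exact this

-- the stateless scatter fold, read back elementwise
theorem fold_set_length (g : Int → Int → Int) (M : List (Int × Int)) :
    ∀ (f0 : List Int),
      (M.foldl (fun f p => PySem.List.pySetD f p.2 (g p.1 p.2)) f0).length = f0.length := by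
  induction M with
  | nil => intro f0; rfl
  | cons p M ih =>
    intro f0
    rw [List.foldl_cons, ih]
    exact PySem.List.length_pySetD _ _ _

theorem fold_set_getElem_notmem (g : Int → Int → Int) :
    ∀ (M : List (Int × Int)) (f0 : List Int) (i : Nat),
      (∀ p ∈ M, 0 ≤ p.2) →
      ((i : Int) ∉ M.map (fun p => p.2)) →
      (M.foldl (fun f p => PySem.List.pySetD f p.2 (g p.1 p.2)) f0)[i]? = f0[i]? := by
  intro M
  induction M with
  | nil => intro f0 i _ _; rfl
  | cons q M ih =>
    intro f0 i hpos hnm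
    obtain ⟨s0, oi0⟩ := q
    rw [List.map_cons, List.mem_cons] at hnm
    push_neg at hnm
    rw [List.foldl_cons, ih _ i (fun p hp => hpos p (List.mem_cons_of_mem _ hp)) hnm.2]
    have h0 : (0:Int) ≤ oi0 := hpos (s0, oi0) (List.mem_cons_self ..)
    rw [PySem.List.pySetD_of_nonneg _ _ h0]
    have hne : oi0.toNat ≠ i := by
      intro h
      apply hnm.1
      rw [← h, Int.toNat_of_nonneg h0]
    rw [List.getElem?_set_ne hne]

theorem fold_set_getElem (g : Int → Int → Int) :
    ∀ (M : List (Int × Int)) (f0 : List Int) (i : Nat) (s : Int),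
      (M.map (fun p => p.2)).Nodup →
      (∀ p ∈ M, 0 ≤ p.2) →
      (∀ p ∈ M, p.2 < (f0.length : Int)) →
      (s, (i : Int)) ∈ M →
      (M.foldl (fun f p => PySem.List.pySetD f p.2 (g p.1 p.2)) f0)[i]? = some (g s i) := by
  intro M
  induction M with
  | nil => intro f0 i s _ _ _ hm; exact absurd hm (List.not_mem_nil)
  | cons q M ih =>
    intro f0 i s hnd hpos hlt hm
    obtain ⟨s0, oi0⟩ := q
    rw [List.map_cons, List.nodup_cons] at hnd
    obtain ⟨hni, hndM⟩ := hnd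
    rw [List.foldl_cons]
    rcases List.mem_cons.mp hm with heq | hm
    · have hs : s0 = s := (congrArg Prod.fst heq).symm
      have hoi : oi0 = (i : Int) := (congrArg Prod.snd heq).symm
      subst hs; subst hoi
      rw [fold_set_getElem_notmem g M _ i
        (fun p hp => hpos p (List.mem_cons_of_mem _ hp)) hni]
      have hi : i < f0.length := by
        have := hlt (s0, (i : Int)) (List.mem_cons_self ..)
        omega
      rw [PySem.List.pySetD_of_nonneg _ _ (by omega)]
      simp [List.getElem?_set_self', List.getElem?_eq_getElem hi]
    · exact ih _ i s hndM (fun p hp => hpos p (List.mem_cons_of_mem _ hp))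
        (fun p hp => by rw [PySem.List.length_pySetD]; exact hlt p (List.mem_cons_of_mem _ hp))
        hm

-- B's table build: folding setdefault over the descending enumeration (from 1) maps
-- every member of the sorted list to 1 + the number of strictly greater elements
theorem setdefault_fold_getD (L : List Int) :
    ∀ (rest done : List Int) (d : PySem.Dict Int Int),
    L = done ++ rest →
    L.Pairwise (fun a b => b ≤ a) →
    (∀ x : Int, d.contains x = decide (x ∈ done)) →
    (∀ x ∈ done, d.getD x 0 = 1 + (L.countP (fun t => decide (x < t)) : Int)) →
    ∀ x ∈ L,
      ((PySem.List.enumerate rest ((done.length : Int) + 1)).foldl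
        (fun d p => PySem.Dict.setdefault d p.2 p.1) d).getD x 0
        = 1 + (L.countP (fun t => decide (x < t)) : Int) := by
  intro rest
  induction rest with
  | nil =>
    intro done d hL _ _ hval x hx
    rw [PySem.List.enumerate_nil, List.foldl_nil]
    exact hval x (by rw [hL, List.append_nil] at hx; exact hx)
  | cons s rest ih =>
    intro done d hL hpw hcont hval x hx
    rw [PySem.List.enumerate_cons, List.foldl_cons]
    dsimp only
    have hlen1 : ((done ++ [s]).length : Int) + 1 = (done.length : Int) + 1 + 1 := by
      simp
    by_cases hc : s ∈ done
    · have hcs : d.contains s = true := by rw [hcont]; simp [hc]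
      rw [PySem.Dict.setdefault_of_contains _ _ hcs]
      have := ih (done ++ [s]) d
        (by rw [hL]; simp)
        hpw
        (by
          intro y
          rw [hcont]
          by_cases hy : y = s
          · subst hy; simp [hc]
          · simp [List.mem_append, hy])
        (by
          intro y hy
          rcases List.mem_append.mp hy with hy | hy
          · exact hval y hy
          · simp at hy; subst hy; exact hval _ hc)
        x hx
      rwa [hlen1] at this
    · have hcs : d.contains s = false := by rw [hcont]; simp [hc]
      rw [PySem.Dict.setdefault_of_not_contains _ _ hcs]
      -- the new key s gets exactly its competition rank
      have hpw' := hL ▸ hpw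
      have hksplit := List.pairwise_append.mp hpw'
      have hk : (done.length : Int) + 1 = 1 + (L.countP (fun t => decide (s < t)) : Int) := by
        have hdone : done.countP (fun t => decide (s < t)) = done.length := by
          rw [List.countP_eq_length]
          intro a ha
          have h1 : s ≤ a := hksplit.2.2 a ha s (List.mem_cons_self ..)
          have h2 : a ≠ s := fun h => hc (h ▸ ha)
          exact decide_eq_true (lt_of_le_of_ne h1 (Ne.symm h2))
        have hrest : (s :: rest).countP (fun t => decide (s < t)) = 0 := by
          rw [List.countP_eq_zero]
          intro t ht
          rcases List.mem_cons.mp ht with rfl | ht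
          · simp
          · simpa using not_lt_of_ge ((List.pairwise_cons.mp hksplit.2.1).1 t ht)
        rw [hL, List.countP_append, hdone, hrest]
        push_cast
        ring
      have := ih (done ++ [s]) (d.insert s ((done.length : Int) + 1))
        (by rw [hL]; simp)
        hpw
        (by
          intro y
          rw [PySem.Dict.contains_insert, hcont]
          by_cases hy : y = s
          · subst hy; simp
          · simp [List.mem_append, hy])
        (by
          intro y hy
          rcases List.mem_append.mp hy with hy | hy
          · have hys : y ≠ s := fun h => hc (h ▸ hy)
            rw [PySem.Dict.getD_insert, if_neg hys]
            exact hval y hy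
          · simp at hy; subst hy
            rw [PySem.Dict.getD_insert, if_pos rfl]
            exact hk)
        x hx
      rwa [hlen1] at this

theorem rank_of_getD (score : List Int) (x : Int) (hx : x ∈ score) :
    ((PySem.List.enumerate (PySem.List.sorted score (fun y => y) true) 1).foldl
      (fun d p => PySem.Dict.setdefault d p.2 p.1) PySem.Dict.empty).getD x 0
      = 1 + (score.countP (fun t => decide (x < t)) : Int) := by
  have hperm : (PySem.List.sorted score (fun y => y) true).Perm score :=
    PySem.List.sorted_perm ..
  have hpw : (PySem.List.sorted score (fun y => y) true).Pairwise (fun a b => b ≤ a) :=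
    PySem.List.sorted_pairwise_rev ..
  have h := setdefault_fold_getD (PySem.List.sorted score (fun y => y) true)
    (PySem.List.sorted score (fun y => y) true) [] PySem.Dict.empty
    rfl hpw (by intro y; simp [PySem.Dict.contains_empty]) (by intro y hy; simp at hy)
    x (hperm.mem_iff.mpr hx)
  rw [List.length_nil, Nat.cast_zero, zero_add] at h
  rwa [hperm.countP_eq] at h

-- ===== VERDICT (by name: the statement is the Claim_ definition above) =====
theorem findRanksAndPerformance_spec : Claim_equal_findRanksAndPerformance := by
  intro score perf _ hpre
  unfold Spec_findRanksAndPerformance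
  obtain ⟨hne, _⟩ := hpre
  have hperm0 : (PySem.List.sorted2 ((PySem.List.enumerate score).map (fun p => (p.2, p.1)))
      (fun x => x.1) (fun x => x.2) true).Perm
      ((PySem.List.enumerate score).map (fun p => (p.2, p.1))) :=
    PySem.List.sorted2_perm ..
  cases hM : PySem.List.sorted2 ((PySem.List.enumerate score).map (fun p => (p.2, p.1)))
      (fun x => x.1) (fun x => x.2) true with
  | nil =>
    exfalso
    rw [hM] at hperm0
    have := hperm0.length_eq
    simp [PySem.List.length_enumerate] at this
    exact hne (List.length_eq_zero_iff.mp this.symm)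
  | cons a0 tl =>
    rw [hM] at hperm0
    -- reduce port A to the stateful loop
    unfold findRanksAndPerformance
    rw [hM]
    simp only []
    -- pairwise / order facts about athletes = a0 :: tl
    have hpw : (a0 :: tl).Pairwise (fun a b : Int × Int => b.1 ≤ a.1) := by
      rw [← hM]; exact sorted2_rev_pairwise_fst _
    have hge : ∀ b ∈ a0 :: tl, b.1 ≤ a0.1 := by
      intro b hb
      rcases List.mem_cons.mp hb with rfl | hb
      · exact le_refl _
      · exact (List.pairwise_cons.mp hpw).1 b hb
    have hrk1 : (1 : Int) = rkA (a0 :: tl) a0.1 := by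
      have h0 : ((a0 :: tl).map (fun p => p.1)).countP (fun t => decide (a0.1 < t)) = 0 := by
        rw [List.countP_eq_zero]
        intro t ht
        obtain ⟨a, ha, rfl⟩ := List.mem_map.mp ht
        simpa using not_lt_of_ge (hge a ha)
      rw [rkA, h0]
      simp
    have hloop := loop_final perf (a0 :: tl) (a0 :: tl) [] a0.1 1 0
      (List.replicate score.length 0) (List.replicate score.length 0)
      rfl hpw (by simp) hge hrk1
    simp only [List.length_nil, Nat.cast_zero] at hloop
    rw [hloop]
    -- replace the count over athletes' scores by the count over score
    have hmapfst : ((a0 :: tl).map (fun p => p.1)).Perm score := by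
      have h1 := hperm0.map (fun p : Int × Int => p.1)
      rw [List.map_map] at h1
      have h2 : (PySem.List.enumerate score).map ((fun p : Int × Int => p.1) ∘ (fun p : Int × Int => (p.2, p.1)))
          = score := PySem.List.map_snd_enumerate score 0
      rwa [h2] at h1
    have hfun : (fun (f : List Int) (p : Int × Int) =>
          PySem.List.pySetD f p.2 (rkA (a0 :: tl) p.1 * PySem.List.pyGetD perf p.2 0))
        = (fun (f : List Int) (p : Int × Int) =>
          PySem.List.pySetD f p.2
            ((1 + (score.countP (fun t => decide (p.1 < t)) : Int)) * PySem.List.pyGetD perf p.2 0)) := by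
      funext f p
      rw [rkA, hmapfst.countP_eq]
    rw [hfun]
    -- characterize the members of athletes
    have hchar : ∀ p ∈ (a0 :: tl), ∃ (k : Nat) (h : k < score.length), p = (score[k], (k : Int)) := by
      intro p hp
      have hp' : p ∈ (PySem.List.enumerate score).map (fun p : Int × Int => (p.2, p.1)) :=
        hperm0.mem_iff.mp hp
      obtain ⟨q, hq, rfl⟩ := List.mem_map.mp hp'
      obtain ⟨k, hk, rfl⟩ := (PySem.List.mem_enumerate_iff ..).mp hq
      exact ⟨k, hk, by simp⟩
    have hpos : ∀ p ∈ (a0 :: tl), (0 : Int) ≤ p.2 := by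
      intro p hp; obtain ⟨k, hk, rfl⟩ := hchar p hp; simp
    have hlt : ∀ p ∈ (a0 :: tl), p.2 < ((List.replicate score.length (0:Int)).length : Int) := by
      intro p hp; obtain ⟨k, hk, rfl⟩ := hchar p hp; simp; exact_mod_cast hk
    have hnd : ((a0 :: tl).map (fun p => p.2)).Nodup := by
      have h1 := (hperm0.map (fun p : Int × Int => p.2)).symm
      rw [List.map_map] at h1
      have h2 : ((PySem.List.enumerate score).map ((fun p : Int × Int => p.2) ∘ (fun p : Int × Int => (p.2, p.1)))).Nodup := by
        have h3 : (PySem.List.enumerate score 0).Pairwise (fun p q : Int × Int => p.1 < q.1) :=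
          PySem.List.pairwise_lt_enumerate score 0
        have h4 := (List.pairwise_map.mpr h3 :
          ((PySem.List.enumerate score 0).map ((fun p : Int × Int => p.2) ∘ (fun p : Int × Int => (p.2, p.1)))).Pairwise (· < ·))
        exact h4.imp ne_of_lt
      exact h1.nodup h2
    -- compare elementwise
    have hlenA : ((a0 :: tl).foldl
        (fun (f : List Int) (p : Int × Int) => PySem.List.pySetD f p.2
          ((1 + (score.countP (fun t => decide (p.1 < t)) : Int)) * PySem.List.pyGetD perf p.2 0))
        (List.replicate score.length 0)).length = score.length := by
      rw [fold_set_length (g := fun s oi =>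
        (1 + (score.countP (fun t => decide (s < t)) : Int)) * PySem.List.pyGetD perf oi 0)]
      simp
    have hlenB : (findRanksAndPerformance_alt score perf).length = score.length := by
      unfold findRanksAndPerformance_alt
      simp [PySem.List.length_enumerate]
    apply List.ext_getElem?
    intro i
    by_cases hi : i < score.length
    · have hmem : (score[i], (i : Int)) ∈ (a0 :: tl) := by
        apply hperm0.mem_iff.mpr
        apply List.mem_map.mpr
        refine ⟨((0 : Int) + (i : Nat), score[i]), ?_, by simp⟩
        exact (PySem.List.mem_enumerate_iff ..).mpr ⟨i, hi, rfl⟩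
      rw [fold_set_getElem (g := fun s oi =>
          (1 + (score.countP (fun t => decide (s < t)) : Int)) * PySem.List.pyGetD perf oi 0)
          (a0 :: tl) _ i score[i] hnd hpos hlt hmem]
      unfold findRanksAndPerformance_alt
      rw [List.getElem?_map]
      rw [PySem.List.getElem?_enumerate]
      rw [List.getElem?_eq_getElem hi]
      simp only [Option.map_some, zero_add]
      rw [rank_of_getD score score[i] (List.getElem_mem hi)]
    · rw [List.getElem?_eq_none (by rw [hlenA]; omega),
          List.getElem?_eq_none (by rw [hlenB]; omega)]
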